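-- pv_equiv track=rewrite | github.com/saquib208/PythonInterviewProgram | Interview_program.py | remove_duplicate_occurence
-- ===== SOURCE A (Python) =====
-- def remove_duplicate_occurence(l,a,n):
--     count=0
--     for i in range(0,len(l)):
--         if a in l[i]:
--             count +=1
--             if count==n:
--                 del l[i]
--                 break
--     return l
-- ===== SOURCE B (Python) =====
-- def remove_duplicate_occurence(l, a, n):
--     # collect all match positions first, then do one guarded deletion
--     indices = [i for i in range(len(l)) if a in l[i]]
--     if 1 <= n <= len(indices):
--         del l[indices[n - 1]]
--     return l
-- ===== Notes on version B (the rewrite author's own statement) =====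
-- stated objective: alternative
-- what changed: Collect-then-act: B first builds the list of all indices whose sublist contains a, then performs one guarded deletion at indices[n-1], replacing A's inline counter-with-break loop.
import Mathlib
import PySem

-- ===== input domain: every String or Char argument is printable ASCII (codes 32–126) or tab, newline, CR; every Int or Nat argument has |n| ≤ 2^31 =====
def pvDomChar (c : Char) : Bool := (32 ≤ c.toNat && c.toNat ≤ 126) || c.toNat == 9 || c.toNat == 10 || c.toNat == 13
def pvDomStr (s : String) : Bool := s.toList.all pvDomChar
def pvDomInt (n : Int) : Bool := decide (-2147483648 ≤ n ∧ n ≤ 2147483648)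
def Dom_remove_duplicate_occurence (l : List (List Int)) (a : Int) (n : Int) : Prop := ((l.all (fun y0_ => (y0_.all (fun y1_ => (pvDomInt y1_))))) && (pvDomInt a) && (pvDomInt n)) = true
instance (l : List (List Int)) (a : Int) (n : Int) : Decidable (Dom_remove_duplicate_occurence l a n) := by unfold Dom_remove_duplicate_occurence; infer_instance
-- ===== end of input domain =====

-- B replaces A's inline counter-with-break loop by a collect-then-act decomposition (gather all matching indices, then one guarded deletion); same cost, alternative structure. Equivalence is about the return value; both Pythons also mutate l in place identically.


-- ===== PORT A =====
-- A: counter loop; on the i-th element containing a, bump count; when count==n delete it and break.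
-- Transcribed as structural recursion over the list carrying count (del l[i]; break == drop this element, keep the rest).
def removeLoopA (l : List (List Int)) (a : Int) (n : Int) (count : Int) : List (List Int) :=
  match l with
  | [] => []
  | x :: xs =>
    if a ∈ x then
      if count + 1 == n then xs
      else x :: removeLoopA xs a n (count + 1)
    else x :: removeLoopA xs a n count

def remove_duplicate_occurence (l : List (List Int)) (a : Int) (n : Int) : List (List Int) :=
  removeLoopA l a n 0

-- ===== PORT B =====
-- B: collect all matching indices in one pass, then one guarded deletion at indices[n-1].
def remove_duplicate_occurence_alt (l : List (List Int)) (a : Int) (n : Int) : List (List Int) :=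
  let indices := (List.range l.length).filter (fun i => decide (a ∈ l[i]!))
  if 1 ≤ n ∧ n ≤ (indices.length : Int) then l.eraseIdx (indices[(n - 1).toNat]!)
  else l

-- ===== PRECONDITION & SPEC =====
def Spec_remove_duplicate_occurence (l : List (List Int)) (a : Int) (n : Int) (out : List (List Int)) : Prop := out = remove_duplicate_occurence_alt l a n
instance (l : List (List Int)) (a : Int) (n : Int) (out : List (List Int)) : Decidable (Spec_remove_duplicate_occurence l a n out) := by unfold Spec_remove_duplicate_occurence; infer_instance

-- ===== CLAIM (what is proved, stated in full; the proofs are below) =====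
def Claim_equal_remove_duplicate_occurence : Prop := ∀ (l : List (List Int)) (a : Int) (n : Int), Dom_remove_duplicate_occurence l a n → Spec_remove_duplicate_occurence l a n (remove_duplicate_occurence l a n)

-- ===== LEMMAS AND PROOFS =====

-- recursive characterisation of B's index list (proof helper)
def midx (a : Int) : List (List Int) → List Nat
  | [] => []
  | x :: xs => if a ∈ x then 0 :: (midx a xs).map (· + 1) else (midx a xs).map (· + 1)

theorem getbang_cons_succ (x : Nat) (xs : List Nat) (k : Nat) : (x :: xs)[k + 1]! = xs[k]! := by
  simp [List.getElem!_eq_getElem?_getD]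

theorem mapshift (m : List Nat) (k : Nat) (hlt : k < m.length) :
    (m.map (fun v => v + 1))[k]! = m[k]! + 1 := by
  simp [List.getElem!_eq_getElem?_getD, List.getElem?_map, List.getElem?_eq_getElem hlt]

theorem filter_range_eq_midx (a : Int) (l : List (List Int)) :
    (List.range l.length).filter (fun i => decide (a ∈ l[i]!)) = midx a l := by
  induction l with
  | nil => simp [midx]
  | cons x xs ih =>
    simp only [List.length_cons, List.range_succ_eq_map, List.filter_cons, List.filter_map]
    by_cases hx : a ∈ x <;>
      simp [midx, hx, ← ih, Function.comp_def] <;> rfl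

theorem loopA_eq (a n : ℤ) (l : List (List Int)) : ∀ count : ℤ,
    removeLoopA l a n count =
      if 1 ≤ n - count ∧ n - count ≤ ((midx a l).length : Int) then
        l.eraseIdx ((midx a l)[(n - count - 1).toNat]!)
      else l := by
  induction l with
  | nil => intro count; simp [removeLoopA, midx]
  | cons x xs ih =>
    intro count
    by_cases hx : a ∈ x
    · by_cases hn : count + 1 = n
      · have h1 : n - count = 1 := by omega
        simp [removeLoopA, hx, hn, midx, h1]
      · have hne : (count + 1 == n) = false := by simp; omega
        simp only [removeLoopA, hx, if_true, hne, Bool.false_eq_true, if_false, ih (count + 1),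
          midx, List.length_cons, List.length_map]
        by_cases hc : 1 ≤ n - (count + 1) ∧ n - (count + 1) ≤ ((midx a xs).length : Int)
        · have hc' : 1 ≤ n - count ∧ n - count ≤ (((midx a xs).length + 1 : ℕ) : Int) := by
            push_cast; omega
          rw [if_pos hc, if_pos hc']
          have hk : (n - count - 1).toNat = (n - (count + 1) - 1).toNat + 1 := by omega
          have hlt : (n - (count + 1) - 1).toNat < (midx a xs).length := by omega
          rw [hk, getbang_cons_succ, mapshift _ _ hlt, List.eraseIdx_cons_succ]
        · have hc' : ¬(1 ≤ n - count ∧ n - count ≤ (((midx a xs).length + 1 : ℕ) : Int)) := by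
            push_cast; push_cast at hc; omega
          rw [if_neg hc, if_neg hc']
    · simp only [removeLoopA, hx, if_false, ih count, midx, List.length_map]
      by_cases hc : 1 ≤ n - count ∧ n - count ≤ ((midx a xs).length : Int)
      · rw [if_pos hc, if_pos hc]
        have hlt : (n - count - 1).toNat < (midx a xs).length := by omega
        rw [mapshift _ _ hlt, List.eraseIdx_cons_succ]
      · rw [if_neg hc, if_neg hc]

-- ===== VERDICT (by name: the statement is the Claim_ definition above) =====
theorem remove_duplicate_occurence_spec : Claim_equal_remove_duplicate_occurence := by
  intro l a n _
  unfold Spec_remove_duplicate_occurence remove_duplicate_occurence remove_duplicate_occurence_alt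
  rw [loopA_eq, filter_range_eq_midx]
  norm_num
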